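-- pv_equiv track=rewrite | github.com/yuwons/E-commerce-analytics-project | src/data_generation/Products table.py | generate_category_list
-- ===== SOURCE A (Python) =====
-- def generate_category_list(num_products, categories):
--     """
--     product_id 1~NUM_PRODUCTS에 대해
--     카테고리들이 최대한 균등하게 분포되도록 리스트 생성
--
--     예: 300개, 7카테고리 → 대략 42~43개씩 할당
--     """
--     n_cat = len(categories)
--     base = num_products // n_cat
--     remainder = num_products % n_cat
--
--     # 각 카테고리에 최소 base 개수씩 할당
--     counts = [base] * n_cat
--     # 나머지 remainder개는 앞에서부터 1개씩 추가
--     for i in range(remainder):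
--         counts[i] += 1
--
--     cat_list = []
--     for cat, cnt in zip(categories, counts):
--         cat_list.extend([cat] * cnt)
--
--     # 혹시 길이가 맞지 않으면 슬라이스/추가로 정리
--     cat_list = cat_list[:num_products]
--     return cat_list
-- ===== SOURCE B (Python) =====
-- def generate_category_list(num_products, categories):
--     # Position-driven: for each product slot p, compute its category index in
--     # closed form (first `remainder` categories get base+1 slots, the rest base).
--     base = num_products // len(categories)
--     remainder = num_products % len(categories)
--     cutoff = remainder * (base + 1)
--     cat_list = []
--     for p in range(num_products):
--         if p < cutoff:
--             idx = p // (base + 1)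
--         else:
--             idx = remainder + (p - cutoff) // base
--         cat_list.append(categories[idx])
--     return cat_list
-- ===== Notes on version B (the rewrite author's own statement) =====
-- stated objective: alternative
-- what changed: Replaces A's per-category block emission (build a counts table, then extend with cnt copies of each category, then slice a copy) with a single loop over product positions that picks each position's category by a closed-form index computation.
import Mathlib
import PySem

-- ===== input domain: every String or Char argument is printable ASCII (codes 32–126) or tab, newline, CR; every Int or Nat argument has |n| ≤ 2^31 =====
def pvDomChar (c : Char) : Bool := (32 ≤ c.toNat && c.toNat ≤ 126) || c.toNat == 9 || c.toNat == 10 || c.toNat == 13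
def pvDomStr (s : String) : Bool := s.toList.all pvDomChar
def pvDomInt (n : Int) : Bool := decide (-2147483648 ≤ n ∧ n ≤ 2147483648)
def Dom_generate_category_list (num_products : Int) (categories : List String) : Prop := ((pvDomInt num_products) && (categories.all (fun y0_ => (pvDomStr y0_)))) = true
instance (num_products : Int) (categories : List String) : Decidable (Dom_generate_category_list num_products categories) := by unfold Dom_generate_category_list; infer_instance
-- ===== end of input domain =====

-- B replaces A's per-category block emission with a position-driven loop using a
-- closed-form index; same asymptotic cost, different decomposition.

-- ===== PORT A =====
def generate_category_list (num_products : Int) (categories : List String) : List String :=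
  let n_cat : Int := categories.length
  let base := PySem.Int.floordiv num_products n_cat
  let remainder := PySem.Int.mod num_products n_cat
  let counts := List.replicate categories.length base
  let counts := (PySem.List.pyRange 0 remainder 1).foldl
    (fun cs i => PySem.List.pySetD cs i (PySem.List.pyGetD cs i 0 + 1)) counts
  let cat_list := (categories.zip counts).foldl
    (fun acc cc => acc ++ PySem.List.pyRepeat [cc.1] cc.2) []
  PySem.List.slice cat_list none (some num_products)

-- ===== PORT B =====
def generate_category_list_alt (num_products : Int) (categories : List String) : List String :=
  let base := PySem.Int.floordiv num_products categories.length
  let remainder := PySem.Int.mod num_products categories.length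
  let cutoff := remainder * (base + 1)
  (PySem.List.pyRange 0 num_products 1).foldl
    (fun acc p =>
      let idx := if p < cutoff then PySem.Int.floordiv p (base + 1)
                 else remainder + PySem.Int.floordiv (p - cutoff) base
      acc ++ [PySem.List.pyGetD categories idx ""]) []

-- ===== PRECONDITION & SPEC =====
-- Pre_ excludes only the empty category list, on which Python A raises ZeroDivisionError.
def Pre_generate_category_list (num_products : Int) (categories : List String) : Prop :=
  categories ≠ []
instance (num_products : Int) (categories : List String) : Decidable (Pre_generate_category_list num_products categories) := by unfold Pre_generate_category_list; infer_instance
def pvWitness_generate_category_list : Int × List String := (7, ["a", "b", "c"])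

def Spec_generate_category_list (num_products : Int) (categories : List String) (out : List String) : Prop := out = generate_category_list_alt num_products categories
instance (num_products : Int) (categories : List String) (out : List String) : Decidable (Spec_generate_category_list num_products categories out) := by unfold Spec_generate_category_list; infer_instance

-- ===== CLAIM (what is proved, stated in full; the proofs are below) =====
def Claim_equal_generate_category_list : Prop := ∀ (num_products : Int) (categories : List String), Dom_generate_category_list num_products categories → Pre_generate_category_list num_products categories → Spec_generate_category_list num_products categories (generate_category_list num_products categories)

-- ===== LEMMAS AND PROOFS =====

-- boundary of category block i: first r blocks have size base+1, the rest size base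
def pvS (r : Nat) (base : Int) (i : Nat) : Int := (min i r : Int) + (i : Int) * base

-- B's per-position category index
def pvIdx (r : Nat) (base : Int) (p : Int) : Int :=
  if p < (r : Int) * (base + 1) then PySem.Int.floordiv p (base + 1)
  else (r : Int) + PySem.Int.floordiv (p - (r : Int) * (base + 1)) base

-- a map over a 1-step range whose function is constant is a replicate
lemma pv_map_const_pyRange {α : Type} (g : Int → α) (c : α) :
    ∀ (m : Nat) (a b : Int), (b - a).toNat = m → (∀ p, a ≤ p → p < b → g p = c) →
      (PySem.List.pyRange a b 1).map g = List.replicate m c := by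
  intro m
  induction m with
  | zero =>
    intro a b hm _
    rw [PySem.List.pyRange_one_eq_nil (by omega)]
    simp
  | succ m ih =>
    intro a b hm hg
    rw [PySem.List.pyRange_one_cons (by omega)]
    simp only [List.map_cons, List.replicate_succ]
    refine congrArg₂ _ (hg a le_rfl (by omega)) ?_
    exact ih (a + 1) b (by omega) (fun p hp1 hp2 => hg p (by omega) hp2)

-- B's index picks block i on block i's position range
lemma pv_idx_eq (r : Nat) (base : Int) (i : Nat) (p : Int)
    (hbase : 0 ≤ base) (h1 : pvS r base i ≤ p) (h2 : p < pvS r base (i + 1)) :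
    pvIdx r base p = (i : Int) := by
  unfold pvIdx
  unfold pvS at h1 h2
  by_cases hir : i < r
  · rw [min_eq_left (by exact_mod_cast hir.le : (i : Int) ≤ r)] at h1
    rw [min_eq_left (by exact_mod_cast hir : ((i + 1 : Nat) : Int) ≤ r)] at h2
    have hlb : (i : Int) * (base + 1) ≤ p := by linarith
    have hub : p < ((i : Int) + 1) * (base + 1) := by push_cast at h2 ⊢; linarith
    have hcut : p < (r : Int) * (base + 1) := by
      have : ((i : Int) + 1) * (base + 1) ≤ (r : Int) * (base + 1) := by
        apply mul_le_mul_of_nonneg_right _ (by omega)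
        exact_mod_cast (by omega : (i + 1 : Nat) ≤ r)
      linarith
    rw [if_pos hcut, PySem.Int.floordiv_eq_iff_of_pos (by omega)]
    exact ⟨hlb, hub⟩
  · rw [min_eq_right (by exact_mod_cast Nat.le_of_not_lt hir : (r : Int) ≤ i)] at h1
    rw [min_eq_right (by exact_mod_cast (by omega : r ≤ i + 1) : (r : Int) ≤ ((i + 1 : Nat) : Int))] at h2
    have hbpos : 0 < base := by
      by_contra hb
      have hb0 : base = 0 := by omega
      rw [hb0] at h1 h2; push_cast at h1 h2; omega
    have hlb : ((i : Int) - r) * base ≤ p - (r : Int) * (base + 1) := by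
      have : (r : Int) + (i : Int) * base ≤ p := by exact_mod_cast h1
      nlinarith
    have hub : p - (r : Int) * (base + 1) < ((i : Int) - r + 1) * base := by
      have : p < (r : Int) + ((i : Int) + 1) * base := by push_cast at h2 ⊢; linarith
      nlinarith
    have hcut : ¬ p < (r : Int) * (base + 1) := by
      have : (0 : Int) ≤ ((i : Int) - r) * base :=
        mul_nonneg (by
          have : (r : Int) ≤ i := by exact_mod_cast Nat.le_of_not_lt hir
          omega) hbase
      omega
    have hq : PySem.Int.floordiv (p - (r : Int) * (base + 1)) base = (i : Int) - r := by
      rw [PySem.Int.floordiv_eq_iff_of_pos hbpos]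
      exact ⟨hlb, hub⟩
    rw [if_neg hcut, hq]; ring

lemma pv_counts_fold (n : Nat) (b : Int) :
    ∀ (r : Nat), r ≤ n →
      (PySem.List.pyRange 0 (r : Int) 1).foldl
        (fun cs i => PySem.List.pySetD cs i (PySem.List.pyGetD cs i 0 + 1))
        (List.replicate n b)
      = (List.range n).map (fun i => if i < r then b + 1 else b) := by
  intro r
  induction r with
  | zero =>
    intro _
    rw [PySem.List.pyRange_one_eq_nil (by omega)]
    simp [List.map_const']
  | succ r ih =>
    intro hr
    have hrn : r < n := by omega
    have hcast : ((r + 1 : Nat) : Int) = (r : Int) + 1 := by push_cast; ring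
    rw [hcast, PySem.List.pyRange_one_succ_right (by positivity), List.foldl_append, ih (by omega)]
    simp only [List.foldl_cons, List.foldl_nil, PySem.List.pySetD_natCast, PySem.List.pyGetD_natCast]
    have hlen : r < ((List.range n).map (fun i => if i < r then b + 1 else b)).length := by
      simpa using hrn
    rw [List.getD_eq_getElem _ _ hlen]
    simp only [List.getElem_map, List.getElem_range, lt_irrefl, if_false]
    apply List.ext_getElem (by simp)
    intro j hj1 hj2
    simp only [List.getElem_set, List.getElem_map, List.getElem_range]
    split_ifs <;> first | rfl | omega

lemma pvS_zero (r : Nat) (base : Int) : pvS r base 0 = 0 := by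
  unfold pvS; simp

lemma pvS_succ_sub (r : Nat) (base : Int) (i : Nat) :
    pvS r base (i + 1) - pvS r base i = if i < r then base + 1 else base := by
  unfold pvS; push_cast
  by_cases h : i < r
  · have h1 : min (i : Int) r = i := min_eq_left (by exact_mod_cast h.le)
    have h2 : min ((i : Int) + 1) r = (i : Int) + 1 := min_eq_left (by exact_mod_cast h)
    rw [if_pos h, h1, h2]; ring
  · have hle : r ≤ i := Nat.le_of_not_lt h
    have h1 : min (i : Int) r = r := min_eq_right (by exact_mod_cast hle)
    have h2 : min ((i : Int) + 1) r = r := min_eq_right (by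
      have : (r : Int) ≤ i := by exact_mod_cast hle
      omega)
    rw [if_neg h, h1, h2]; ring

lemma pvS_mono (r : Nat) (base : Int) (hbase : 0 ≤ base) {i j : Nat} (hij : i ≤ j) :
    pvS r base i ≤ pvS r base j := by
  unfold pvS; push_cast
  have hij' : (i : Int) ≤ j := by exact_mod_cast hij
  have hmul : (i : Int) * base ≤ (j : Int) * base := mul_le_mul_of_nonneg_right hij' hbase
  have hmin : min (i : Int) r ≤ min (j : Int) r := min_le_min hij' le_rfl
  linarith

-- main suffix induction: positions from boundary n-k onward yield exactly the blocks n-k..n-1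
lemma pv_suffix (cats : List String) (base : Int) (r : Nat)
    (hbase : 0 ≤ base) (hr : r ≤ cats.length) :
    ∀ (k : Nat), k ≤ cats.length →
      (PySem.List.pyRange (pvS r base (cats.length - k)) (pvS r base cats.length) 1).map
        (fun p => PySem.List.pyGetD cats (pvIdx r base p) "")
      = ((cats.drop (cats.length - k)).zip
          (((List.range cats.length).map (fun i => if i < r then base + 1 else base)).drop (cats.length - k))).flatMap
          (fun cc => PySem.List.pyRepeat [cc.1] cc.2) := by
  intro k
  induction k with
  | zero =>
    intro _
    simp only [Nat.sub_zero]
    rw [PySem.List.pyRange_one_eq_nil le_rfl, List.drop_length]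
    simp
  | succ k ih =>
    intro hk
    have hin : cats.length - (k + 1) < cats.length := by omega
    set n := cats.length with hn
    set i := n - (k + 1) with hi
    have hstep : n - k = i + 1 := by omega
    rw [hstep] at ih
    have hdiff : pvS r base (i + 1) - pvS r base i = if i < r then base + 1 else base :=
      pvS_succ_sub r base i
    have hmono1 : pvS r base i ≤ pvS r base (i + 1) := by
      by_cases h : i < r <;> simp [h] at hdiff <;> omega
    have hmono2 : pvS r base (i + 1) ≤ pvS r base n := pvS_mono r base hbase (by omega)
    rw [PySem.List.pyRange_one_append _ (pvS r base (i + 1)) _ hmono1 hmono2, List.map_append,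
        ih (by omega)]
    -- head block
    have hconst : (PySem.List.pyRange (pvS r base i) (pvS r base (i + 1)) 1).map
        (fun p => PySem.List.pyGetD cats (pvIdx r base p) "")
        = List.replicate ((if i < r then base + 1 else base)).toNat (cats[i]'hin) := by
      apply pv_map_const_pyRange _ _ _ _ _ (by rw [hdiff])
      intro p hp1 hp2
      rw [pv_idx_eq r base i p hbase hp1 hp2, PySem.List.pyGetD_natCast,
          List.getD_eq_getElem _ _ hin]
    rw [hconst]
    -- tail decomposition of the zip
    have hlenm : i < ((List.range n).map (fun j => if j < r then base + 1 else base)).length := by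
      simpa using hin
    rw [List.drop_eq_getElem_cons hin, List.drop_eq_getElem_cons hlenm]
    simp only [List.zip_cons_cons, List.flatMap_cons]
    rw [PySem.List.pyRepeat_singleton]
    simp only [List.getElem_map, List.getElem_range]

-- ===== VERDICT (by name: the statement is the Claim_ definition above) =====
theorem generate_category_list_spec : Claim_equal_generate_category_list := by
  intro N cats _ hpre
  unfold Spec_generate_category_list
  have hn : 0 < cats.length := List.length_pos_of_ne_nil hpre
  set n := cats.length with hnn
  have hnpos : (0 : Int) < (n : Int) := by exact_mod_cast hn
  set base := PySem.Int.floordiv N (n : Int) with hbase_def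
  set rem := PySem.Int.mod N (n : Int) with hrem_def
  have hrem0 : 0 ≤ rem := PySem.Int.mod_nonneg N hnpos
  have hremlt : rem < (n : Int) := PySem.Int.mod_lt N hnpos
  have hNid : base * (n : Int) + rem = N := PySem.Int.floordiv_mul_add_mod N (n : Int)
  set r := rem.toNat with hr_def
  have hrcast : (r : Int) = rem := Int.toNat_of_nonneg hrem0
  have hrn : r ≤ n := by omega
  -- unfold both ports
  show generate_category_list N cats = generate_category_list_alt N cats
  unfold generate_category_list generate_category_list_alt
  simp only []
  rw [← hnn, ← hbase_def, ← hrem_def, ← hrcast, pv_counts_fold n base r hrn]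
  rcases le_or_gt N 0 with hN | hN
  · -- empty result on both sides
    have hball : ∀ j : Nat, (if j < r then base + 1 else base) ≤ 0 := by
      intro j
      by_cases hj : j < r
      · rw [if_pos hj]
        have hrpos : 0 < rem := by omega
        nlinarith
      · rw [if_neg hj]
        nlinarith
    have hflat : (cats.zip ((List.range n).map (fun j => if j < r then base + 1 else base))).foldl
        (fun acc cc => acc ++ PySem.List.pyRepeat [cc.1] cc.2) [] = ([] : List String) := by
      rw [PySem.List.foldl_append_eq_flatMap, List.nil_append, List.flatMap_eq_nil_iff]
      intro cc hcc
      rcases List.of_mem_zip hcc with ⟨_, hc2⟩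
      rcases List.mem_map.mp hc2 with ⟨j, _, hj⟩
      rw [PySem.List.pyRepeat_singleton]
      have := hball j
      rw [hj] at this
      simp [Int.toNat_of_nonpos this]
    rw [hflat, PySem.List.pyRange_one_eq_nil hN]
    simp [PySem.List.slice]
  · -- positive N: both sides are the position map
    have hbase0 : 0 ≤ base := by nlinarith
    have hsum : pvS r base n = N := by
      unfold pvS
      rw [min_eq_right (by exact_mod_cast hrn)]
      rw [hrcast]
      linarith
    have hmain := pv_suffix cats base r hbase0 hrn n le_rfl
    rw [Nat.sub_self, pvS_zero, hsum, ← hnn] at hmain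
    rw [List.drop_zero, List.drop_zero] at hmain
    rw [PySem.List.foldl_append_eq_flatMap, List.nil_append, ← hmain]
    rw [PySem.List.foldl_append_singleton_eq_map, List.nil_append]
    have hlen : ((PySem.List.pyRange 0 N 1).map
        (fun p => PySem.List.pyGetD cats (pvIdx r base p) "")).length = N.toNat := by
      rw [List.length_map, PySem.List.length_pyRange_one]
      omega
    have hslice := PySem.List.slice_to ((PySem.List.pyRange 0 N 1).map
        (fun p => PySem.List.pyGetD cats (pvIdx r base p) "")) hN.le
    rw [hslice, ← hlen, List.take_length]
    unfold pvIdx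
    rfl
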